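-- pv_equiv track=rewrite | github.com/redpanda-ai/Meerkat | meerkat/fat_head/pybossa/build_pybossa_project.py | format_merchant_names
-- ===== SOURCE A (Python) =====
-- def format_merchant_names(top_merchants):
-- 	"""Format merchant names"""
-- 	top_merchants_maps = {}
-- 	for merchant in top_merchants:
-- 		name = merchant.replace(" ", "_")
-- 		for mark in '!"#$%&\'()*+,-./:;<=>?@[]^`{|}~':
-- 			name = name.replace(mark, '')
-- 		top_merchants_maps[name] = merchant
-- 	top_merchants = list(top_merchants_maps.keys())
-- 	return top_merchants, top_merchants_maps
-- ===== SOURCE B (Python) =====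
-- _PUNCT = frozenset('!"#$%&\'()*+,-./:;<=>?@[]^`{|}~')
--
-- def format_merchant_names(top_merchants):
-- 	"""Format merchant names"""
-- 	top_merchants_maps = {}
-- 	for merchant in top_merchants:
-- 		name = ''.join('_' if c == ' ' else c
-- 		               for c in merchant if c not in _PUNCT)
-- 		top_merchants_maps[name] = merchant
-- 	return list(top_merchants_maps.keys()), top_merchants_maps
-- ===== Notes on version B (the rewrite author's own statement) =====
-- stated objective: faster
-- what changed: Replaces A's 30 repeated full-string str.replace passes per merchant with a single character-wise pass that drops punctuation via a precomputed frozenset and maps space to underscore on the fly.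
import Mathlib
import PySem

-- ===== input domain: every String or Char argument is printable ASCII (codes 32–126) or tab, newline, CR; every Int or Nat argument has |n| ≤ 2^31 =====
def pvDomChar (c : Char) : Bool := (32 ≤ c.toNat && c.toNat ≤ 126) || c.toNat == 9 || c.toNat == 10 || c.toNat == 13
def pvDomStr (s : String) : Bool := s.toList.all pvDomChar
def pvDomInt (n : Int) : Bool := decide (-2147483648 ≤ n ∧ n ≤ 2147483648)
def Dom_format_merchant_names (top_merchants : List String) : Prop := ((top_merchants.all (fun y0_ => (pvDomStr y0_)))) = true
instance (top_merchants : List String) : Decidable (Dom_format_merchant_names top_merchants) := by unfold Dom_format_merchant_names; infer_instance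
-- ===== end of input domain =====

-- B replaces A's 30 repeated full-string str.replace scans per merchant by one single
-- character-wise pass with a precomputed punctuation set (objective: faster, constant factor).

-- ===== PORT A =====
-- the punctuation marks A iterates over, in A's order
def pvMarks : List Char := "!\"#$%&'()*+,-./:;<=>?@[]^`{|}~".toList

def format_merchant_names (top_merchants : List String) : List String × (List (String × String)) :=
  let maps : PySem.Dict String String :=
    top_merchants.foldl (fun maps merchant =>
      let name := PySem.Str.replace merchant " " "_"
      let name := pvMarks.foldl (fun name mark => PySem.Str.replace name (String.ofList [mark]) "") name
      maps.insert name merchant) PySem.Dict.empty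
  (maps.keys, maps.items)

-- ===== PORT B =====
def pvPunct : PySem.Set Char := PySem.Set.ofList "!\"#$%&'()*+,-./:;<=>?@[]^`{|}~".toList

-- ''.join('_' if c == ' ' else c for c in merchant if c not in _PUNCT)
def pvCleanB (merchant : String) : String :=
  String.ofList (merchant.toList.filterMap (fun c =>
    if c ∈ pvPunct then none else some (if c = ' ' then '_' else c)))

def format_merchant_names_alt (top_merchants : List String) : List String × (List (String × String)) :=
  let maps : PySem.Dict String String :=
    top_merchants.foldl (fun maps merchant => maps.insert (pvCleanB merchant) merchant) PySem.Dict.empty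
  (maps.keys, maps.items)

-- ===== PRECONDITION & SPEC =====
def Spec_format_merchant_names (top_merchants : List String) (out : List String × (List (String × String))) : Prop := out = format_merchant_names_alt top_merchants
instance (top_merchants : List String) (out : List String × (List (String × String))) : Decidable (Spec_format_merchant_names top_merchants out) := by unfold Spec_format_merchant_names; infer_instance

-- ===== CLAIM (what is proved, stated in full; the proofs are below) =====
def Claim_equal_format_merchant_names : Prop := ∀ (top_merchants : List String), Dom_format_merchant_names top_merchants → Spec_format_merchant_names top_merchants (format_merchant_names top_merchants)

-- ===== LEMMAS AND PROOFS =====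

-- replace.go with a single-character needle is a flatMap over the characters
theorem replace_go_single (c : Char) (new : List Char) :
    ∀ (fuel : Nat) (s acc : List Char), s.length ≤ fuel →
      PySem.Chars.replace.go [c] new fuel s acc
        = acc.reverse ++ s.flatMap (fun x => if x = c then new else [x]) := by
  intro fuel
  induction fuel with
  | zero =>
    intro s acc h
    have : s = [] := List.eq_nil_of_length_eq_zero (Nat.le_zero.mp h)
    subst this; simp [PySem.Chars.replace.go]
  | succ n ih =>
    intro s acc h
    cases s with
    | nil => simp [PySem.Chars.replace.go]
    | cons x t =>
      simp only [PySem.Chars.replace.go, List.isPrefixOf]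
      by_cases hx : c = x
      · subst hx
        simp only [beq_self_eq_true, Bool.true_and, if_pos]
        rw [ih _ _ (by simpa using Nat.le_of_succ_le_succ h)]
        simp
      · have : (c == x) = false := beq_eq_false_iff_ne.mpr hx
        simp only [this, Bool.false_and, if_neg Bool.false_ne_true]
        rw [ih _ _ (by simpa using Nat.le_of_succ_le_succ h)]
        simp [Ne.symm hx]

theorem replace_single (s : List Char) (c : Char) (new : List Char) :
    PySem.Chars.replace s [c] new = s.flatMap (fun x => if x = c then new else [x]) := by
  rw [PySem.Chars.replace]
  simp [replace_go_single c new s.length s [] (Nat.le_refl _)]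

theorem replace_single_map (s : List Char) (c d : Char) :
    PySem.Chars.replace s [c] [d] = s.map (fun x => if x = c then d else x) := by
  rw [replace_single]
  induction s with
  | nil => rfl
  | cons x t ih => by_cases hx : x = c <;> simp [hx, ih]

theorem replace_single_del (s : List Char) (c : Char) :
    PySem.Chars.replace s [c] [] = s.filter (fun x => x ≠ c) := by
  rw [replace_single]
  induction s with
  | nil => rfl
  | cons x t ih => by_cases hx : x = c <;> simp [hx, ih]

-- folding deletions over a list of marks filters out every mark at once
theorem foldl_del_eq_filter (marks : List Char) :
    ∀ (s : List Char),
      marks.foldl (fun s m => PySem.Chars.replace s [m] []) s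
        = s.filter (fun x => ¬ x ∈ marks) := by
  induction marks with
  | nil => intro s; simp
  | cons m rest ih =>
    intro s
    rw [List.foldl_cons, replace_single_del, ih, List.filter_filter]
    apply List.filter_congr
    intro x _
    by_cases hx : x = m <;> simp [hx]

-- the String-level fold of A is the Chars-level fold
theorem str_foldl_del (marks : List Char) :
    ∀ (s : String),
      marks.foldl (fun name mark => PySem.Str.replace name (String.ofList [mark]) "") s
        = String.ofList (marks.foldl (fun s m => PySem.Chars.replace s [m] []) s.toList) := by
  induction marks with
  | nil => intro s; simp
  | cons m rest ih =>
    intro s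
    have h : (PySem.Str.replace s (String.ofList [m]) "").toList
        = PySem.Chars.replace s.toList [m] [] := by
      simp [PySem.Str.replace]
    rw [List.foldl_cons, List.foldl_cons, ih, h]

-- per-merchant: A's chain of replaces equals B's single filterMap pass
theorem clean_eq (merchant : String) :
    (pvMarks.foldl (fun name mark => PySem.Str.replace name (String.ofList [mark]) "")
      (PySem.Str.replace merchant " " "_")) = pvCleanB merchant := by
  rw [str_foldl_del, pvCleanB]
  apply congrArg
  have hsp : PySem.Str.replace merchant " " "_"
      = String.ofList (merchant.toList.map (fun x => if x = ' ' then '_' else x)) := by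
    simp only [PySem.Str.replace]
    apply congrArg
    have : (" " : String).toList = [' '] := by decide
    have h2 : ("_" : String).toList = ['_'] := by decide
    rw [this, h2, replace_single_map]
  rw [hsp, foldl_del_eq_filter, String.toList_ofList]
  induction merchant.toList with
  | nil => rfl
  | cons x t ih =>
    by_cases hm : x ∈ pvMarks
    · have hx : x ≠ ' ' := by rintro rfl; revert hm; decide
      have hp : x ∈ pvPunct := by
        simpa [pvPunct, PySem.Set.ofList, pvMarks] using hm
      simp [hx, hm, hp]
      simpa using ih
    · by_cases hs : x = ' '
      · subst hs
        have h1 : ('_' : Char) ∉ pvMarks := by decide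
        have h2 : (' ' : Char) ∉ pvPunct := by decide
        simp [h1, h2]
        simpa using ih
      · have hp : x ∉ pvPunct := by
          simpa [pvPunct, PySem.Set.ofList, pvMarks] using hm
        simp [hs, hm, hp]
        simpa using ih

-- ===== VERDICT (by name: the statement is the Claim_ definition above) =====
theorem format_merchant_names_spec : Claim_equal_format_merchant_names := by
  intro top_merchants _
  show format_merchant_names top_merchants = format_merchant_names_alt top_merchants
  unfold format_merchant_names format_merchant_names_alt
  have : (fun (maps : PySem.Dict String String) (merchant : String) =>
      maps.insert (pvMarks.foldl (fun name mark => PySem.Str.replace name (String.ofList [mark]) "")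
        (PySem.Str.replace merchant " " "_")) merchant)
      = (fun maps merchant => maps.insert (pvCleanB merchant) merchant) := by
    funext maps merchant
    rw [clean_eq]
  simp only [this]
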